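-- pv_equiv track=rewrite | github.com/inveniosoftware-contrib/invenio-checker | invenio_checker/clients/worker.py | _workers_touch_common_paths
-- ===== SOURCE A (Python) =====
-- import itertools as it
--
-- def _workers_touch_common_paths(paths1, paths2):
--
--     def paths_are_exclusive(path1, path2):
--         return path1.startswith(path2) or path2.startswith(path1)
--
--     if not paths1:
--         paths1 = {'/'}
--     if not paths2:
--         paths2 = {'/'}
--     for a, b in it.product(paths1, paths2):
--         if paths_are_exclusive(a, b):
--             return True
--     return False
-- ===== SOURCE B (Python) =====
-- def _workers_touch_common_paths(paths1, paths2):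
--     # Hash-set of paths1 and a one-time set of ALL prefixes of paths1:
--     # each q in paths2 is then decided by set lookups on its prefixes,
--     # with no pairwise product scan.
--     p1 = list(paths1) or ['/']
--     p2 = list(paths2) or ['/']
--     exact = set(p1)
--     prefixes = set()
--     for p in p1:
--         for i in range(len(p) + 1):
--             prefixes.add(p[:i])
--     for q in p2:
--         if q in prefixes:
--             return True
--         for i in range(len(q) + 1):
--             if q[:i] in exact:
--                 return True
--     return False
-- ===== Notes on version B (the rewrite author's own statement) =====
-- stated objective: alternative
-- what changed: Replaces the pairwise product of startswith checks with a hash-set of paths1 plus a one-time set of all prefixes of paths1, so each path of paths2 is decided by per-character set lookups instead of a scan over all of paths1.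
import Mathlib
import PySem

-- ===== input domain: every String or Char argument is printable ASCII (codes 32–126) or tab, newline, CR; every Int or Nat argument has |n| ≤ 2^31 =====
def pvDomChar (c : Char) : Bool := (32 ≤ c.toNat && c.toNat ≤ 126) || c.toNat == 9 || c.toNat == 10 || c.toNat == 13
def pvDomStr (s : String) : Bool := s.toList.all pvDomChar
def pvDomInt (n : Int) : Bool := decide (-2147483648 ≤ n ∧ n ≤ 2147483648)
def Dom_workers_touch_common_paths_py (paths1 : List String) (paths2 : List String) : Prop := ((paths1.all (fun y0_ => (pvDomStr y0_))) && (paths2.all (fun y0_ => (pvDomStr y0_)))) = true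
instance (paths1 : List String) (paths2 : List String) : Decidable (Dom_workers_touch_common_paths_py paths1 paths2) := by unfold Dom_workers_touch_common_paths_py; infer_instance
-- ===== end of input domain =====

-- B replaces A's pairwise product of startswith checks with a hash-set of paths1
-- and a one-time set of all prefixes of paths1 (objective: alternative algorithm).


-- ===== PORT A =====
-- paths_are_exclusive(path1, path2)
def pvPathsAreExclusive (path1 path2 : String) : Bool :=
  PySem.Str.startswith path1 path2 || PySem.Str.startswith path2 path1

-- for a, b in it.product(paths1, paths2): if paths_are_exclusive(a, b): return True
def workers_touch_common_paths_py (paths1 : List String) (paths2 : List String) : Bool :=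
  let p1 := if paths1 = [] then ["/"] else paths1
  let p2 := if paths2 = [] then ["/"] else paths2
  (p1.flatMap (fun a => p2.map (fun b => (a, b)))).any
    (fun ab => pvPathsAreExclusive ab.1 ab.2)

-- ===== PORT B =====
-- the set of all prefixes p[:i] of every p in p1
def pvPrefixSet (p1 : List String) : PySem.Set String :=
  p1.foldl (fun s p =>
    (PySem.List.pyRange 0 (PySem.Str.len p + 1) 1).foldl
      (fun s i => PySem.Set.add s (PySem.Str.slice p none (some i))) s)
    PySem.Set.empty

def workers_touch_common_paths_py_alt (paths1 : List String) (paths2 : List String) : Bool :=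
  let p1 := if paths1 = [] then ["/"] else paths1
  let p2 := if paths2 = [] then ["/"] else paths2
  let exact := PySem.Set.ofList p1
  let prefixes := pvPrefixSet p1
  p2.any (fun q =>
    PySem.Set.contains prefixes q ||
    (PySem.List.pyRange 0 (PySem.Str.len q + 1) 1).any
      (fun i => PySem.Set.contains exact (PySem.Str.slice q none (some i))))

-- ===== PRECONDITION & SPEC =====
def Spec_workers_touch_common_paths_py (paths1 : List String) (paths2 : List String) (out : Bool) : Prop := out = workers_touch_common_paths_py_alt paths1 paths2
instance (paths1 : List String) (paths2 : List String) (out : Bool) : Decidable (Spec_workers_touch_common_paths_py paths1 paths2 out) := by unfold Spec_workers_touch_common_paths_py; infer_instance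

-- ===== CLAIM (what is proved, stated in full; the proofs are below) =====
def Claim_equal_workers_touch_common_paths_py : Prop := ∀ (paths1 : List String) (paths2 : List String), Dom_workers_touch_common_paths_py paths1 paths2 → Spec_workers_touch_common_paths_py paths1 paths2 (workers_touch_common_paths_py paths1 paths2)

-- ===== LEMMAS AND PROOFS =====

theorem pv_contains_iff {s : PySem.Set String} {x : String} :
    PySem.Set.contains s x = true ↔ x ∈ s := by
  simp [PySem.Set.contains]

-- q = p[:i] for some i in range(len(p)+1)  ↔  q.toList is a prefix of p.toList
theorem pv_exists_slice_iff_prefix (p q : String) :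
    (∃ i ∈ PySem.List.pyRange 0 (PySem.Str.len p + 1) 1,
        q = PySem.Str.slice p none (some i)) ↔ q.toList <+: p.toList := by
  constructor
  · rintro ⟨i, hi, rfl⟩
    rw [PySem.List.mem_pyRange_one] at hi
    have : (PySem.Str.slice p none (some i)).toList = p.toList.take i.toNat := by
      rw [PySem.Str.toList_slice, PySem.Chars.slice_eq_listSlice]
      exact PySem.List.slice_to _ hi.1
    rw [this]; exact List.take_prefix _ _
  · intro h
    refine ⟨(q.toList.length : Int), ?_, ?_⟩
    · rw [PySem.List.mem_pyRange_one, PySem.Str.len_eq]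
      have := h.length_le
      omega
    · apply String.toList_inj.mp
      rw [PySem.Str.toList_slice, PySem.Chars.slice_eq_listSlice,
        PySem.List.slice_to _ (by positivity)]
      simpa using List.prefix_iff_eq_take.mp h

-- membership in a fold of Set.add over f
theorem pv_mem_foldl_add {α β : Type} [BEq α] [LawfulBEq α] (f : β → α) (l : List β)
    (s : PySem.Set α) (q : α) :
    q ∈ l.foldl (fun s i => PySem.Set.add s (f i)) s ↔ q ∈ s ∨ ∃ i ∈ l, q = f i := by
  induction l generalizing s with
  | nil => simp
  | cons x xs ih => simp [List.foldl_cons, ih, PySem.Set.mem_add]; tauto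

theorem pv_mem_prefixSet_aux (p1 : List String) (s : PySem.Set String) (q : String) :
    q ∈ p1.foldl (fun s p =>
      (PySem.List.pyRange 0 (PySem.Str.len p + 1) 1).foldl
        (fun s i => PySem.Set.add s (PySem.Str.slice p none (some i))) s) s
    ↔ q ∈ s ∨ ∃ p ∈ p1, ∃ i ∈ PySem.List.pyRange 0 (PySem.Str.len p + 1) 1,
        q = PySem.Str.slice p none (some i) := by
  induction p1 generalizing s with
  | nil => simp
  | cons x xs ih => rw [List.foldl_cons, ih, pv_mem_foldl_add]; simp [or_assoc]

theorem pv_mem_prefixSet (p1 : List String) (q : String) :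
    q ∈ pvPrefixSet p1 ↔ ∃ p ∈ p1, q.toList <+: p.toList := by
  unfold pvPrefixSet
  rw [pv_mem_prefixSet_aux]
  simp only [pv_exists_slice_iff_prefix]
  simp [PySem.Set.empty]

theorem pv_core (p1 p2 : List String) :
    (p1.flatMap (fun a => p2.map (fun b => (a, b)))).any
      (fun ab => pvPathsAreExclusive ab.1 ab.2)
    = p2.any (fun q =>
        PySem.Set.contains (pvPrefixSet p1) q ||
        (PySem.List.pyRange 0 (PySem.Str.len q + 1) 1).any
          (fun i => PySem.Set.contains (PySem.Set.ofList p1) (PySem.Str.slice q none (some i)))) := by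
  rw [Bool.eq_iff_iff]
  simp only [List.any_eq_true, List.mem_flatMap, List.mem_map, Bool.or_eq_true,
    pvPathsAreExclusive, PySem.Str.startswith_eq, PySem.Chars.startswith_iff,
    pv_contains_iff, pv_mem_prefixSet, PySem.Set.mem_ofList]
  constructor
  · rintro ⟨ab, ⟨a, ha, b, hb, rfl⟩, hex⟩
    refine ⟨b, hb, ?_⟩
    rcases hex with h | h
    · exact Or.inl ⟨a, ha, h⟩
    · obtain ⟨i, hi, heq⟩ := (pv_exists_slice_iff_prefix b a).mpr h
      exact Or.inr ⟨i, hi, heq ▸ ha⟩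
  · rintro ⟨q, hq, h | ⟨i, hi, hmem⟩⟩
    · obtain ⟨p, hp, hpre⟩ := h
      exact ⟨(p, q), ⟨p, hp, q, hq, rfl⟩, Or.inl hpre⟩
    · have hpre : (PySem.Str.slice q none (some i)).toList <+: q.toList :=
        (pv_exists_slice_iff_prefix q _).mp ⟨i, hi, rfl⟩
      exact ⟨(PySem.Str.slice q none (some i), q), ⟨_, hmem, q, hq, rfl⟩, Or.inr hpre⟩

-- ===== VERDICT (by name: the statement is the Claim_ definition above) =====
theorem workers_touch_common_paths_py_spec : Claim_equal_workers_touch_common_paths_py := by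
  intro paths1 paths2 _
  unfold Spec_workers_touch_common_paths_py workers_touch_common_paths_py workers_touch_common_paths_py_alt
  exact pv_core _ _
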